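-- pv_equiv track=rewrite | github.com/LeoYihaiChen/project1 | code/python/MCF.py | find_shared_max
-- ===== SOURCE A (Python) =====
-- def find_shared_max(a_list, b_list):
--     a_index = len(a_list) - 1
--     b_index = len(b_list) - 1
--
--     while a_index >= 0 and b_index >= 0:
--         a = a_list[a_index]
--         b = b_list[b_index]
--
--         if a == b:
--             return a
--
--         if a > b:
--             a_index -= 1
--         else:
--             b_index -= 1
-- ===== SOURCE B (Python) =====
-- def find_shared_max(a_list, b_list):
--     stack = list(b_list)          # top of stack = end of b_list
--     for x in reversed(a_list):
--         while stack and stack[-1] > x: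
--             stack.pop()           # this b-entry beats every remaining a-candidate turn
--         if not stack:
--             return None
--         if stack[-1] == x:
--             return x
--     return None
-- ===== Notes on version B (the rewrite author's own statement) =====
-- stated objective: alternative
-- what changed: The symmetric two-pointer walk (one loop, three-way branch, two index counters) is recast as an asymmetric nested loop over a different structure: b_list is copied into a stack, and for each candidate taken off a_list's end an inner loop pops stack tops greater than it, then matches or moves on; no index arithmetic remains.
import Mathlib
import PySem

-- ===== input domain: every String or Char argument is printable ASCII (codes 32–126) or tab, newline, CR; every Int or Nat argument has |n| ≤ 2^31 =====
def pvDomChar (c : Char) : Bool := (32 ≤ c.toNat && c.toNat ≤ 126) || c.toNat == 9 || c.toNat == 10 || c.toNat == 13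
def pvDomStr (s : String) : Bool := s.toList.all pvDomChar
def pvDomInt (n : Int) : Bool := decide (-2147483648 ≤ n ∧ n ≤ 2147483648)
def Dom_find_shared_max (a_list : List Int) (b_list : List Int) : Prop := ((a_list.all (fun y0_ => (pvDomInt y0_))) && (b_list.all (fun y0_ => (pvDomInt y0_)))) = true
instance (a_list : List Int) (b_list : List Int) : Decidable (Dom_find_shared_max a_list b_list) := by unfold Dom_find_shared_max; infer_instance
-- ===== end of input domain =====

-- B replaces A's symmetric two-pointer index walk by an asymmetric nested loop: b_list is copied
-- into a stack that is pruned of tops greater than each candidate taken off a_list's end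
-- (alternative decomposition, same cost); equal to A on every input.


-- ===== PORT A =====
-- the while loop; i = a_index + 1, j = b_index + 1 (so i = 0 ↔ a_index = -1, loop exits)
def findSharedGoA (a_list b_list : List Int) : Nat → Nat → Option Int
  | 0, _ => none
  | _ + 1, 0 => none
  | i + 1, j + 1 =>
    let a := a_list.getD i 0   -- in range: i < a_list.length at every call
    let b := b_list.getD j 0
    if a = b then some a
    else if a > b then findSharedGoA a_list b_list i (j + 1)
    else findSharedGoA a_list b_list (i + 1) j
  termination_by i j => i + j

def find_shared_max (a_list : List Int) (b_list : List Int) : Option Int :=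
  findSharedGoA a_list b_list a_list.length b_list.length

-- ===== PORT B =====
-- the stack is modelled top-at-head (Python's list end = head here), so stack.pop() is dropping
-- the head and stack[-1] is the head; 'stack = list(b_list)' is b_list.reverse.
-- Source B's inner 'while stack and stack[-1] > x: stack.pop()'
def pruneTops (x : Int) : List Int → List Int
  | [] => []
  | t :: rest => if t > x then pruneTops x rest else t :: rest

-- Source B's outer 'for x in reversed(a_list): …'
def findSharedGoB : List Int → List Int → Option Int
  | [], _ => none
  | x :: xs, stack =>
    match pruneTops x stack with
    | [] => none
    | t :: rest => if t = x then some x else findSharedGoB xs (t :: rest)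

def find_shared_max_alt (a_list : List Int) (b_list : List Int) : Option Int :=
  findSharedGoB a_list.reverse b_list.reverse

-- ===== PRECONDITION & SPEC =====
def Spec_find_shared_max (a_list : List Int) (b_list : List Int) (out : Option Int) : Prop := out = find_shared_max_alt a_list b_list
instance (a_list : List Int) (b_list : List Int) (out : Option Int) : Decidable (Spec_find_shared_max a_list b_list out) := by unfold Spec_find_shared_max; infer_instance

-- ===== CLAIM =====
def Claim_equal_find_shared_max : Prop := ∀ (a_list : List Int) (b_list : List Int), Dom_find_shared_max a_list b_list → Spec_find_shared_max a_list b_list (find_shared_max a_list b_list)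

-- ===== LEMMAS AND PROOFS =====

-- Proof-side intermediate: A's index walk, rephrased as the merge of the two reversed lists.
def pvMerge : List Int → List Int → Option Int
  | [], _ => none
  | _ :: _, [] => none
  | x :: xs, y :: ys =>
    if x = y then some x
    else if x > y then pvMerge xs (y :: ys)
    else pvMerge (x :: xs) ys

theorem pv_merge_nil_right : ∀ (l : List Int), pvMerge l [] = none := by
  intro l; cases l <;> rw [pvMerge]

theorem pv_take_succ {l : List Int} {k : Nat} (hk : k < l.length) :
    l.take (k + 1) = l.take k ++ [l.getD k 0] := by
  rw [List.take_add_one, List.getElem?_eq_getElem hk, List.getD_eq_getElem _ _ hk]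
  rfl

theorem pv_rev_take_succ {l : List Int} {k : Nat} (hk : k < l.length) :
    (l.take (k + 1)).reverse = l.getD k 0 :: (l.take k).reverse := by
  rw [pv_take_succ hk, List.reverse_append]
  rfl

-- A's index walk over the top i / top j elements is the merge of the reversed prefixes.
theorem pv_goA_eq_merge (a_list b_list : List Int) :
    ∀ n i j, i + j ≤ n → i ≤ a_list.length → j ≤ b_list.length →
      findSharedGoA a_list b_list i j =
        pvMerge (a_list.take i).reverse (b_list.take j).reverse := by
  intro n
  induction n with
  | zero =>
    intro i j hn _ _
    have hi : i = 0 := by omega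
    have hj : j = 0 := by omega
    subst hi; subst hj
    rw [findSharedGoA]
    simp [pvMerge]
  | succ n ih =>
    intro i j hn hi hj
    match i, j with
    | 0, j =>
      rw [findSharedGoA]
      simp [pvMerge]
    | i + 1, 0 =>
      rw [findSharedGoA]
      simp [pv_merge_nil_right]
    | i + 1, j + 1 =>
      have hi' : i < a_list.length := by omega
      have hj' : j < b_list.length := by omega
      rw [findSharedGoA, pv_rev_take_succ hi', pv_rev_take_succ hj', pvMerge]
      by_cases heq : a_list.getD i 0 = b_list.getD j 0
      · rw [if_pos heq, if_pos heq]
      · rw [if_neg heq, if_neg heq]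
        by_cases hgt : a_list.getD i 0 > b_list.getD j 0
        · rw [if_pos hgt, if_pos hgt, ih i (j + 1) (by omega) (by omega) hj,
              pv_rev_take_succ hj']
        · rw [if_neg hgt, if_neg hgt, ih (i + 1) j (by omega) hi (by omega),
              pv_rev_take_succ hi']

-- one outer step of B equals repeated "drop larger b-head" steps of the merge
theorem pv_merge_cons_eq_prune (x : Int) (xs : List Int) :
    ∀ ys : List Int, pvMerge (x :: xs) ys =
      match pruneTops x ys with
      | [] => none
      | t :: rest => if t = x then some x else pvMerge xs (t :: rest) := by
  intro ys
  induction ys with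
  | nil => rw [pvMerge, pruneTops]
  | cons y ys' ih =>
    rw [pvMerge, pruneTops]
    by_cases hgt : y > x
    · have hne : ¬ x = y := by omega
      have hngt : ¬ x > y := by omega
      rw [if_neg hne, if_neg hngt, if_pos hgt, ih]
    · rw [if_neg hgt]
      by_cases heq : x = y
      · simp [if_pos heq, heq]
      · have hxgty : x > y := by omega
        rw [if_neg heq, if_pos hxgty]
        simp only []
        rw [if_neg (fun h : y = x => heq h.symm)]

-- B's stack loop computes the merge, on every pair of lists
theorem pv_goB_eq_merge : ∀ (xs ys : List Int), findSharedGoB xs ys = pvMerge xs ys := by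
  intro xs
  induction xs with
  | nil => intro ys; rw [findSharedGoB, pvMerge]
  | cons x xs' ih =>
    intro ys
    rw [findSharedGoB, pv_merge_cons_eq_prune]
    cases pruneTops x ys with
    | nil => rfl
    | cons t rest =>
      by_cases ht : t = x
      · simp [ht]
      · simp only [if_neg ht]
        exact ih (t :: rest)

-- ===== VERDICT =====
theorem find_shared_max_spec : Claim_equal_find_shared_max := by
  intro a b _
  unfold Spec_find_shared_max find_shared_max find_shared_max_alt
  rw [pv_goA_eq_merge a b (a.length + b.length) _ _ le_rfl le_rfl le_rfl]
  simp only [List.take_length]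
  rw [pv_goB_eq_merge]
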